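-- pv_equiv track=rewrite | github.com/Di-Chai/5002Assignment2 | Q2.py | get_node_detail
-- ===== SOURCE A (Python) =====
-- def get_node_detail(targetValue):
--     nodeDetail = [0, 0, 0]
--     for element in targetValue:
--         if element == 'High':
--             nodeDetail[0] += 1
--         if element == 'Medium':
--             nodeDetail[1] += 1
--         if element == 'Low':
--             nodeDetail[2] += 1
--     return nodeDetail
-- ===== SOURCE B (Python) =====
-- def get_node_detail(targetValue):
--     return [targetValue.count(label) for label in ('High', 'Medium', 'Low')]
-- ===== Notes on version B (the rewrite author's own statement) =====
-- stated objective: idiomatic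
-- what changed: Replaces the single accumulation loop that updates three slots per element with three independent counting passes, one list.count scan per label, mapped over the label tuple.
import Mathlib
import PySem

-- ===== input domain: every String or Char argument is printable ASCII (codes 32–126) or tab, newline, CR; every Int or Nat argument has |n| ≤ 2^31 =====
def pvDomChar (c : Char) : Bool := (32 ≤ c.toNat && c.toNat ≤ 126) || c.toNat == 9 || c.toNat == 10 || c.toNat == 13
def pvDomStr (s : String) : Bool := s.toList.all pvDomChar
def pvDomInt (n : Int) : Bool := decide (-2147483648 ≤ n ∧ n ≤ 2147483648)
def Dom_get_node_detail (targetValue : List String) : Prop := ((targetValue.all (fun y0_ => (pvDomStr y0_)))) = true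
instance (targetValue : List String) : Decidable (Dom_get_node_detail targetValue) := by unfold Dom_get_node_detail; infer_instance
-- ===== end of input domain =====

-- B replaces A's single three-slot accumulation loop with three independent list.count passes, one per label (idiomatic; same cost).


-- ===== PORT A =====
def get_node_detail (targetValue : List String) : List Int :=
  targetValue.foldl (fun nodeDetail element =>
    let nodeDetail := if element == "High" then nodeDetail.set 0 (nodeDetail.getD 0 0 + 1) else nodeDetail
    let nodeDetail := if element == "Medium" then nodeDetail.set 1 (nodeDetail.getD 1 0 + 1) else nodeDetail
    if element == "Low" then nodeDetail.set 2 (nodeDetail.getD 2 0 + 1) else nodeDetail)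
    [0, 0, 0]

-- ===== PORT B =====
def get_node_detail_alt (targetValue : List String) : List Int :=
  (["High", "Medium", "Low"] : List String).map (fun label => (PySem.List.count targetValue label : Int))

-- ===== PRECONDITION & SPEC =====
def Spec_get_node_detail (targetValue : List String) (out : List Int) : Prop := out = get_node_detail_alt targetValue
instance (targetValue : List String) (out : List Int) : Decidable (Spec_get_node_detail targetValue out) := by unfold Spec_get_node_detail; infer_instance

-- ===== CLAIM (what is proved, stated in full; the proofs are below) =====
def Claim_equal_get_node_detail : Prop := ∀ (targetValue : List String), Dom_get_node_detail targetValue → Spec_get_node_detail targetValue (get_node_detail targetValue)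

-- ===== LEMMAS AND PROOFS =====
-- A's loop starting from [a, b, c] adds the count of each label to its slot.
theorem get_node_detail_foldl (l : List String) (a b c : Int) :
    l.foldl (fun nodeDetail element =>
      let nodeDetail := if element == "High" then nodeDetail.set 0 (nodeDetail.getD 0 0 + 1) else nodeDetail
      let nodeDetail := if element == "Medium" then nodeDetail.set 1 (nodeDetail.getD 1 0 + 1) else nodeDetail
      if element == "Low" then nodeDetail.set 2 (nodeDetail.getD 2 0 + 1) else nodeDetail)
      [a, b, c]
    = [a + l.count "High", b + l.count "Medium", c + l.count "Low"] := by
  induction l generalizing a b c with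
  | nil => simp
  | cons x xs ih =>
    simp only [List.foldl_cons, List.count_cons]
    by_cases hH : x = "High" <;> by_cases hM : x = "Medium" <;> by_cases hL : x = "Low" <;>
      simp_all [Int.add_comm, Int.add_left_comm]

-- ===== VERDICT (by name: the statement is the Claim_ definition above) =====
theorem get_node_detail_spec : Claim_equal_get_node_detail := by
  intro tv _
  show get_node_detail tv = get_node_detail_alt tv
  unfold get_node_detail get_node_detail_alt
  rw [get_node_detail_foldl]
  simp [PySem.List.count_eq]
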